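-- pv_equiv track=rewrite | github.com/deut-erium/WriteUps | _drafts/2021/googlectf/story/solve.py | crc
-- ===== SOURCE A (Python) =====
-- def crc(msg,poly,bits):
--     mask = (2**bits)-1
--     crc = mask
--     for byte in msg:
--         for _ in range(8):
--             if (byte^crc)&1:
--                 crc = (crc>>1)^poly
--             else:
--                 crc>>=1
--             byte>>=1
--     return crc^mask
-- ===== SOURCE B (Python) =====
-- def crc(msg, poly, bits):
--     mask = (1 << bits) - 1
--     table = []
--     for i in range(256):
--         c = i
--         for _ in range(8):
--             c = (c >> 1) ^ poly if c & 1 else c >> 1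
--         table.append(c)
--     c = mask
--     for byte in msg:
--         c = (c >> 8) ^ table[(c ^ byte) & 0xFF]
--     return c ^ mask
-- ===== Notes on version B (the rewrite author's own statement) =====
-- stated objective: faster
-- what changed: B precomputes a 256-entry table (each entry is the 8-step bit loop run on one byte value) and then consumes the message one byte per step with crc = (crc>>8) ^ table[(crc^byte)&0xFF], eliminating A's per-bit inner loop over the message.
-- outside the precondition, e.g. on crc([1], 3, -2): A raises TypeError, B raises ValueError
import Mathlib
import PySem

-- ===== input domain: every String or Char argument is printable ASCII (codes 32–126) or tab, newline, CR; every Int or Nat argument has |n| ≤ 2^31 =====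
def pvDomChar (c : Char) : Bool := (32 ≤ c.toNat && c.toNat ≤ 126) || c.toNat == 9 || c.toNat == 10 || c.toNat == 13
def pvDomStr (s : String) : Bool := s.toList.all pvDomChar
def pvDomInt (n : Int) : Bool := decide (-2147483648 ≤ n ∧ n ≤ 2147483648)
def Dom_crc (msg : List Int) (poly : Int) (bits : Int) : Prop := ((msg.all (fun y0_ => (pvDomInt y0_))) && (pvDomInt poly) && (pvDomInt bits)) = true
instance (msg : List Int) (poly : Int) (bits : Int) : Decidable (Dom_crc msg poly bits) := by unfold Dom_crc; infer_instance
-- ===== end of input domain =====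

-- B replaces A's per-bit inner loop by a 256-entry table built once; the message is then consumed one byte per step.
-- Bitwise ops are ported with PySem.Int.bxor/band (Python-exact on negatives); shifts are core >>>/<<< with Nat counts (exact for the constant shifts 1 and 8 here).

-- ===== PORT A =====
-- one pass of A's inner loop body: state is (crc, byte)
def crcStepA (poly : Int) (p : Int × Int) : Int × Int :=
  if PySem.Int.band (PySem.Int.bxor p.2 p.1) 1 ≠ 0 then
    (PySem.Int.bxor (p.1 >>> (1:Nat)) poly, p.2 >>> (1:Nat))
  else
    (p.1 >>> (1:Nat), p.2 >>> (1:Nat))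

def crc (msg : List Int) (poly : Int) (bits : Int) : Int :=
  -- mask = (2**bits)-1; bits ≥ 0 by Pre_crc (Python raises TypeError for bits < 0), so .toNat is exact
  let mask : Int := 2 ^ bits.toNat - 1
  let c := msg.foldl (fun c byte =>
    ((List.range 8).foldl (fun p _ => crcStepA poly p) (c, byte)).1) mask
  PySem.Int.bxor c mask

-- ===== PORT B =====
-- one pass of B's table-building inner loop body
def crcStepB (poly : Int) (c : Int) : Int :=
  if PySem.Int.band c 1 ≠ 0 then PySem.Int.bxor (c >>> (1:Nat)) poly else c >>> (1:Nat)

def crcTable (poly : Int) : List Int :=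
  (List.range 256).map (fun (i : Nat) => (List.range 8).foldl (fun c _ => crcStepB poly c) ((i : Int)))

def crc_alt (msg : List Int) (poly : Int) (bits : Int) : Int :=
  -- mask = (1 << bits)-1; bits ≥ 0 by Pre_crc (Python raises ValueError for bits < 0), so .toNat is exact
  let mask : Int := (1 <<< bits.toNat) - 1
  let table := crcTable poly
  let c := msg.foldl (fun c byte =>
    PySem.Int.bxor (c >>> (8:Nat))
      (table.getD (PySem.Int.band (PySem.Int.bxor c byte) 255).toNat 0)) mask
  PySem.Int.bxor c mask

-- ===== PRECONDITION & SPEC =====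
-- Pre_crc excludes bits < 0 only: there Python A raises a TypeError (2**bits is a float), B a ValueError.
def Pre_crc (msg : List Int) (poly : Int) (bits : Int) : Prop := 0 ≤ bits
instance (msg : List Int) (poly : Int) (bits : Int) : Decidable (Pre_crc msg poly bits) := by unfold Pre_crc; infer_instance
def pvWitness_crc : List Int × Int × Int := ([3, 250, -7], 23, 8)

def Spec_crc (msg : List Int) (poly : Int) (bits : Int) (out : Int) : Prop := out = crc_alt msg poly bits
instance (msg : List Int) (poly : Int) (bits : Int) (out : Int) : Decidable (Spec_crc msg poly bits out) := by unfold Spec_crc; infer_instance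

-- ===== CLAIM (what is proved, stated in full; the proofs are below) =====
def Claim_equal_crc : Prop := ∀ (msg : List Int) (poly : Int) (bits : Int), Dom_crc msg poly bits → Pre_crc msg poly bits → Spec_crc msg poly bits (crc msg poly bits)

-- ===== LEMMAS AND PROOFS =====

theorem shiftR_ofNat (m : Nat) (n : Nat) : (Int.ofNat m) >>> n = Int.ofNat (m >>> n) := rfl
theorem shiftR_negSucc (m : Nat) (n : Nat) : (Int.negSucc m) >>> n = Int.negSucc (m >>> n) := rfl

theorem tb_ofNat (m : Nat) (k : Nat) : (Int.ofNat m).testBit k = m.testBit k := rfl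
theorem tb_negSucc (m : Nat) (k : Nat) : (Int.negSucc m).testBit k = !(m.testBit k) := rfl

theorem tb_shiftRight (x : Int) (n k : Nat) : (x >>> n).testBit k = x.testBit (n + k) := by
  cases x with
  | ofNat m => rw [shiftR_ofNat, tb_ofNat, tb_ofNat, Nat.testBit_shiftRight]
  | negSucc m => rw [shiftR_negSucc, tb_negSucc, tb_negSucc, Nat.testBit_shiftRight]

theorem int_ext {x y : Int} (h : ∀ k, x.testBit k = y.testBit k) : x = y := by
  cases x with
  | ofNat m =>
    cases y with
    | ofNat n =>
      exact congrArg Int.ofNat (Nat.eq_of_testBit_eq fun i => h i)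
    | negSucc n =>
      exfalso
      have hk := h (m + n + 1)
      rw [tb_ofNat, tb_negSucc] at hk
      rw [Nat.testBit_lt_two_pow (by calc m < m + n + 1 := by omega
            _ < 2 ^ (m + n + 1) := Nat.lt_two_pow_self),
          Nat.testBit_lt_two_pow (by calc n < m + n + 1 := by omega
            _ < 2 ^ (m + n + 1) := Nat.lt_two_pow_self)] at hk
      simp at hk
  | negSucc m =>
    cases y with
    | ofNat n =>
      exfalso
      have hk := h (m + n + 1)
      rw [tb_ofNat, tb_negSucc] at hk
      rw [Nat.testBit_lt_two_pow (by calc m < m + n + 1 := by omega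
            _ < 2 ^ (m + n + 1) := Nat.lt_two_pow_self),
          Nat.testBit_lt_two_pow (by calc n < m + n + 1 := by omega
            _ < 2 ^ (m + n + 1) := Nat.lt_two_pow_self)] at hk
      simp at hk
    | negSucc n =>
      have : m = n := Nat.eq_of_testBit_eq fun i => by
        have := h i; rw [tb_negSucc, tb_negSucc] at this; simpa using this
      rw [this]

theorem bxor_eq_xor (a b : Int) : PySem.Int.bxor a b = Int.xor a b := by
  cases a with
  | ofNat m =>
    cases b with
    | ofNat n =>
      simp [PySem.Int.bxor, Int.xor]
    | negSucc n =>
      simp [PySem.Int.bxor, Int.xor, Int.negSucc_eq]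
      omega
  | negSucc m =>
    cases b with
    | ofNat n =>
      simp [PySem.Int.bxor, Int.xor, Int.negSucc_eq]
      omega
    | negSucc n =>
      have h1 : ¬ (0:Int) ≤ Int.negSucc m := by omega
      have h3 : ¬ (0:Int) ≤ Int.negSucc n := by omega
      simp [PySem.Int.bxor, Int.xor, h1, h3]

theorem tb_bxor (a b : Int) (k : Nat) :
    (PySem.Int.bxor a b).testBit k = xor (a.testBit k) (b.testBit k) := by
  rw [bxor_eq_xor]; exact Int.testBit_lxor a b k

theorem band1_ne (a : Int) : (PySem.Int.band a 1 ≠ 0) ↔ a.testBit 0 = true := by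
  cases a with
  | ofNat m =>
    have h : PySem.Int.band (Int.ofNat m) 1 = Int.ofNat (m % 2) := by
      unfold PySem.Int.band
      rw [if_pos (show (0:Int) ≤ Int.ofNat m from Int.natCast_nonneg m), if_pos (show (0:Int) ≤ 1 by decide)]
      rw [show ((1:Int).toNat) = 1 from rfl, show (Int.ofNat m).toNat = m from rfl,
          Nat.and_one_is_mod]
      rfl
    rw [h, tb_ofNat, Nat.testBit_zero]
    simp only [Int.ofNat_eq_natCast, ne_eq, decide_eq_true_eq]
    omega
  | negSucc m =>
    have h : PySem.Int.band (Int.negSucc m) 1 = Int.ofNat (1 - m % 2) := by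
      unfold PySem.Int.band
      rw [if_neg (by omega), if_pos (show (0:Int) ≤ 1 by decide)]
      rw [show ((1:Int).toNat) = 1 from rfl,
          show (-(Int.negSucc m) - 1).toNat = m from by rw [Int.negSucc_eq]; omega,
          Nat.land_comm, Nat.and_one_is_mod]
      rfl
    rw [h, tb_negSucc, Nat.testBit_zero]
    simp only [Int.ofNat_eq_natCast, ne_eq, Bool.not_eq_true', decide_eq_false_iff_not]
    omega

theorem band255_ofNat (m : Nat) : PySem.Int.band (Int.ofNat m) 255 = Int.ofNat (m &&& 255) := by
  unfold PySem.Int.band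
  rw [if_pos (show (0:Int) ≤ Int.ofNat m from Int.natCast_nonneg m), if_pos (show (0:Int) ≤ 255 by decide)]
  rw [show ((255:Int).toNat) = 255 from rfl, show (Int.ofNat m).toNat = m from rfl]
  rfl

theorem band255_negSucc (m : Nat) :
    PySem.Int.band (Int.negSucc m) 255 = Int.ofNat (255 - (255 &&& m)) := by
  unfold PySem.Int.band
  rw [if_neg (by omega), if_pos (show (0:Int) ≤ 255 by decide)]
  rw [show ((255:Int).toNat) = 255 from rfl,
      show (-(Int.negSucc m) - 1).toNat = m from by rw [Int.negSucc_eq]; omega]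
  rfl

theorem nat_and255_lt (m : Nat) : 255 &&& m < 256 := by
  have := Nat.and_le_left (n := 255) (m := m); omega

theorem band255_nonneg (a : Int) : 0 ≤ PySem.Int.band a 255 := by
  cases a with
  | ofNat m => rw [band255_ofNat]; exact Int.natCast_nonneg _
  | negSucc m => rw [band255_negSucc]; exact Int.natCast_nonneg _

theorem band255_lt (a : Int) : PySem.Int.band a 255 < 256 := by
  cases a with
  | ofNat m =>
    rw [band255_ofNat]
    have : m &&& 255 < 256 := Nat.and_lt_two_pow m (show (255:Nat) < 2^8 by norm_num)
    rw [show ((256:Int)) = Int.ofNat 256 from rfl]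
    exact Int.ofNat_lt.mpr this
  | negSucc m =>
    rw [band255_negSucc, show ((256:Int)) = Int.ofNat 256 from rfl]
    exact Int.ofNat_lt.mpr (by omega)

set_option maxRecDepth 40000 in
theorem tb_sub255 (x : Nat) (hx : x < 256) (j : Nat) (hj : j < 8) :
    (255 - x).testBit j = !(x.testBit j) := by
  have H : ∀ x < 256, ∀ j < 8, (255 - x).testBit j = !(x.testBit j) := by decide
  exact H x hx j hj

theorem tb_255 (j : Nat) : (255 : Nat).testBit j = decide (j < 8) := by
  rcases Nat.lt_or_ge j 8 with h | h
  · have H : ∀ j < 8, (255 : Nat).testBit j = decide (j < 8) := by decide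
    exact H j h
  · rw [Nat.testBit_lt_two_pow (by calc (255:Nat) < 2^8 := by norm_num
        _ ≤ 2 ^ j := Nat.pow_le_pow_right (by norm_num) h)]
    simp; omega

theorem tb_band255 (a : Int) (j : Nat) :
    (PySem.Int.band a 255).testBit j = (a.testBit j && decide (j < 8)) := by
  cases a with
  | ofNat m =>
    rw [band255_ofNat, tb_ofNat, tb_ofNat, Nat.testBit_land, tb_255]
  | negSucc m =>
    rw [band255_negSucc, tb_ofNat, tb_negSucc]
    rcases Nat.lt_or_ge j 8 with h | h
    · rw [tb_sub255 _ (nat_and255_lt m) j h, Nat.testBit_land, tb_255]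
      simp [h]
    · rw [Nat.testBit_lt_two_pow (x := 255 - (255 &&& m)) (by
        calc 255 - (255 &&& m) < 2^8 := by omega
        _ ≤ 2 ^ j := Nat.pow_le_pow_right (by norm_num) h)]
      simp; omega

theorem bxor_shiftRight (x y : Int) (n : Nat) :
    PySem.Int.bxor x y >>> n = PySem.Int.bxor (x >>> n) (y >>> n) := by
  apply int_ext; intro k
  simp [tb_shiftRight, tb_bxor]

theorem shiftRight_shiftRight (x : Int) (m n : Nat) : (x >>> m) >>> n = x >>> (m + n) := by
  apply int_ext; intro k
  simp [tb_shiftRight, Nat.add_assoc]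

theorem bxor_cancel_left (t c : Int) : PySem.Int.bxor t (PySem.Int.bxor c t) = c := by
  apply int_ext; intro k
  simp [tb_bxor]
  cases t.testBit k <;> cases c.testBit k <;> decide

-- bit n of (bxor c t) equals bit n of b, for n < 8, where t = band (bxor c b) 255
theorem tb_key (c b : Int) (n : Nat) (hn : n < 8) :
    (PySem.Int.bxor c (PySem.Int.band (PySem.Int.bxor c b) 255)).testBit n = b.testBit n := by
  simp [tb_bxor, tb_band255, hn]


-- above bit 7, (bxor c t) agrees with c
theorem tb_key_high (c b : Int) (n : Nat) (hn : 8 ≤ n) :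
    (PySem.Int.bxor c (PySem.Int.band (PySem.Int.bxor c b) 255)).testBit n = c.testBit n := by
  simp [tb_bxor, tb_band255, Nat.not_lt_of_ge hn]

theorem key_shift8 (c b : Int) :
    PySem.Int.bxor c (PySem.Int.band (PySem.Int.bxor c b) 255) >>> (8:Nat) = c >>> (8:Nat) := by
  apply int_ext; intro k
  rw [tb_shiftRight, tb_shiftRight, tb_key_high c b (8 + k) (by omega)]

theorem bxor_right_comm (x y z : Int) :
    PySem.Int.bxor (PySem.Int.bxor x y) z = PySem.Int.bxor (PySem.Int.bxor x z) y := by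
  apply int_ext; intro k
  simp [tb_bxor]
  cases x.testBit k <;> cases y.testBit k <;> cases z.testBit k <;> decide

-- the decision bits agree: A tests bit 0 of (byte>>>n) ^ (d ^ u), B tests bit 0 of d
theorem decision_eq (c b d : Int) (n : Nat) (hn : n < 8) :
    (PySem.Int.band (PySem.Int.bxor (b >>> (n:Nat))
        (PySem.Int.bxor d (PySem.Int.bxor c (PySem.Int.band (PySem.Int.bxor c b) 255) >>> (n:Nat)))) 1 ≠ 0)
    ↔ (PySem.Int.band d 1 ≠ 0) := by
  rw [band1_ne, band1_ne]
  rw [tb_bxor, tb_shiftRight, tb_bxor, tb_shiftRight]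
  simp only [Nat.add_zero]
  rw [tb_key c b n hn]
  cases b.testBit n <;> simp

theorem inner_inv (poly c b : Int) (n : Nat) (hn : n ≤ 8) :
    (List.range n).foldl (fun p _ => crcStepA poly p) (c, b)
    = (PySem.Int.bxor
        ((List.range n).foldl (fun d _ => crcStepB poly d) (PySem.Int.band (PySem.Int.bxor c b) 255))
        (PySem.Int.bxor c (PySem.Int.band (PySem.Int.bxor c b) 255) >>> (n:Nat)),
       b >>> (n:Nat)) := by
  induction n with
  | zero =>
    simp [bxor_cancel_left]
  | succ n ih =>
    have hn' : n < 8 := by omega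
    rw [List.range_succ, List.foldl_append, List.foldl_append,
        ih (by omega)]
    simp only [List.foldl_cons, List.foldl_nil]
    set d := (List.range n).foldl (fun d _ => crcStepB poly d) (PySem.Int.band (PySem.Int.bxor c b) 255) with hd
    set u := PySem.Int.bxor c (PySem.Int.band (PySem.Int.bxor c b) 255) with hu
    unfold crcStepA crcStepB
    simp only
    rw [if_congr (decision_eq c b d n hn') rfl rfl]
    by_cases hdec : PySem.Int.band d 1 ≠ 0
    · rw [if_pos hdec, if_pos hdec]
      refine Prod.ext ?_ ?_
      · simp only
        rw [bxor_shiftRight d (u >>> (n:Nat)) 1, bxor_right_comm,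
            shiftRight_shiftRight]
      · simp only
        rw [shiftRight_shiftRight]
    · rw [if_neg hdec, if_neg hdec]
      refine Prod.ext ?_ ?_
      · simp only
        rw [bxor_shiftRight d (u >>> (n:Nat)) 1, shiftRight_shiftRight]
      · simp only
        rw [shiftRight_shiftRight]

theorem byte_lemma (poly c b : Int) :
    ((List.range 8).foldl (fun p _ => crcStepA poly p) (c, b)).1
    = PySem.Int.bxor (c >>> (8:Nat))
        ((List.range 8).foldl (fun d _ => crcStepB poly d) (PySem.Int.band (PySem.Int.bxor c b) 255)) := by
  rw [inner_inv poly c b 8 (by omega)]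
  simp only
  rw [key_shift8 c b, PySem.Int.bxor_comm]

theorem table_getD (poly t : Int) (h0 : 0 ≤ t) (h1 : t < 256) :
    (crcTable poly).getD t.toNat 0 = (List.range 8).foldl (fun d _ => crcStepB poly d) t := by
  have hlt : t.toNat < 256 := by omega
  unfold crcTable
  rw [List.getD_eq_getElem?_getD]
  simp only [List.getElem?_map, List.getElem?_range hlt, Option.map_some, Option.getD_some]
  rw [Int.toNat_of_nonneg h0]

theorem one_shiftLeft_nat_cast (n : Nat) : (((1 <<< n : Nat)) : Int) = 2 ^ n := by
  rw [Nat.shiftLeft_eq, Nat.one_mul]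
  exact Int.natCast_pow 2 n

-- ===== VERDICT (by name: the statement is the Claim_ definition above) =====
theorem crc_spec : Claim_equal_crc := by
  intro msg poly bits _ _
  unfold Spec_crc crc crc_alt
  simp only
  rw [show (((1 <<< bits.toNat : Nat)) : Int) = 2 ^ bits.toNat from one_shiftLeft_nat_cast bits.toNat]
  congr 1
  apply List.foldl_ext
  intro c byte _
  rw [byte_lemma poly c byte,
      table_getD poly _ (band255_nonneg _) (band255_lt _)]
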